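-- pv_equiv track=rewrite | github.com/LDYWINNER/PycharmProjects | Tutoring/22SPRQuiz4.py | what_order
-- ===== SOURCE A (Python) =====
-- def what_order(lst):
--     a = -1
--     b = lst[0]
--
--     for i in range(1, len(lst)):
--         if a == 0 and lst[i] >= b or i == 1 and lst[i] >= b:            # if block: ascending order
--             a = 0
--             b = lst[i]
--         elif a == 1 and lst[i] < b or i == 1 and lst[i] < b:
--             a = 1
--             b = lst[i]
--         else:
--             a = 2
--             break
--     return a
-- ===== SOURCE B (Python) =====
-- def what_order(lst):
--     first = lst[0]
--     if len(lst) == 1: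
--         return -1
--     if all(x >= y for x, y in zip(lst[1:], lst)):
--         return 0
--     if all(x < y for x, y in zip(lst[1:], lst)):
--         return 1
--     return 2
-- ===== Notes on version B (the rewrite author's own statement) =====
-- stated objective: simpler
-- what changed: Replaced A's single state-machine loop (mode/prev-value state with break) by a length guard plus two short-circuiting all() scans over consecutive pairs (non-decreasing, then strictly decreasing).
import Mathlib
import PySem

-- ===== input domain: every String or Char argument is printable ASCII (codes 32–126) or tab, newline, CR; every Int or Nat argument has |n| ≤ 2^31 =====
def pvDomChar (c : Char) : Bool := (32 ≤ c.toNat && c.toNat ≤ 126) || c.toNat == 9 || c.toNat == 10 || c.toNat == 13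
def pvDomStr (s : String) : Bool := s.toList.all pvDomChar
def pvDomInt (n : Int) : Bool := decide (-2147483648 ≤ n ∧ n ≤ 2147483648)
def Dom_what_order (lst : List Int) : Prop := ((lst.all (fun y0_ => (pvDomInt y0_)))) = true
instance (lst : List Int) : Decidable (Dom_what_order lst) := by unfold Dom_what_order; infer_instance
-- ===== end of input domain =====

-- B replaces A's single branchy state-machine index loop with two short-circuiting
-- pairwise scans (all >= then all <); simpler decomposition, same cost.


-- ===== PORT A =====
-- the for-loop over range(1, len(lst)) with state (a, b) and break
def whatOrderLoop (lst : List Int) (i : Nat) (a b : Int) : Int :=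
  if h : i < lst.length then
    let x := lst.getD i 0
    if (a == 0 && decide (b ≤ x)) || (i == 1 && decide (b ≤ x)) then
      whatOrderLoop lst (i+1) 0 x
    else if (a == 1 && decide (x < b)) || (i == 1 && decide (x < b)) then
      whatOrderLoop lst (i+1) 1 x
    else 2
  else a
termination_by lst.length - i

-- on the empty list Python raises IndexError at the initial indexing; excluded by Pre_, value arbitrary
def what_order (lst : List Int) : Int :=
  match lst with
  | [] => -1
  | b :: _ => whatOrderLoop lst 1 (-1) b

-- ===== PORT B =====
def what_order_alt (lst : List Int) : Int :=
  match lst with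
  | [] => -1  -- Python raises here (first-element access); excluded by Pre_
  | _ :: _ =>
    if lst.length == 1 then -1
    else if ((lst.drop 1).zip lst).all (fun p => decide (p.2 ≤ p.1)) then 0
    else if ((lst.drop 1).zip lst).all (fun p => decide (p.1 < p.2)) then 1
    else 2

-- ===== PRECONDITION & SPEC =====
-- Pre_ excludes only the empty list, on which A (and B) raise IndexError indexing the first element.
def Pre_what_order (lst : List Int) : Prop := lst ≠ []
instance (lst : List Int) : Decidable (Pre_what_order lst) := by unfold Pre_what_order; infer_instance
def pvWitness_what_order : List Int := ([1, 2, 2, 3])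

def Spec_what_order (lst : List Int) (out : Int) : Prop := out = what_order_alt lst
instance (lst : List Int) (out : Int) : Decidable (Spec_what_order lst out) := by unfold Spec_what_order; infer_instance

-- ===== CLAIM (what is proved, stated in full; the proofs are below) =====
def Claim_equal_what_order : Prop := ∀ (lst : List Int), Dom_what_order lst → Pre_what_order lst → Spec_what_order lst (what_order lst)

-- ===== LEMMAS AND PROOFS =====

-- consecutive-pair chain predicates used to characterise both ports
def chainGe : List Int → Bool
  | x :: y :: t => decide (x ≤ y) && chainGe (y :: t)
  | _ => true

def chainLt : List Int → Bool
  | x :: y :: t => decide (y < x) && chainLt (y :: t)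
  | _ => true

lemma zip_all_ge (lst : List Int) :
    ((lst.drop 1).zip lst).all (fun p => decide (p.2 ≤ p.1)) = chainGe lst := by
  induction lst with
  | nil => rfl
  | cons x t ih =>
    cases t with
    | nil => rfl
    | cons y u =>
      simp only [List.drop_one, List.tail_cons, List.zip, List.zipWith, List.all_cons, chainGe]
      have := ih
      simp only [List.drop_one, List.tail_cons] at this
      rw [← this]
      rfl

lemma zip_all_lt (lst : List Int) :
    ((lst.drop 1).zip lst).all (fun p => decide (p.1 < p.2)) = chainLt lst := by
  induction lst with
  | nil => rfl
  | cons x t ih =>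
    cases t with
    | nil => rfl
    | cons y u =>
      simp only [List.drop_one, List.tail_cons, List.zip, List.zipWith, List.all_cons, chainLt]
      have := ih
      simp only [List.drop_one, List.tail_cons] at this
      rw [← this]
      rfl

lemma drop_getD (lst : List Int) (i : Nat) (h : i < lst.length) :
    lst.drop i = lst.getD i 0 :: lst.drop (i+1) := by
  rw [List.getD_eq_getElem _ _ h]
  exact (List.getElem_cons_drop h).symm

lemma loop_state0 (lst : List Int) : ∀ i b, 2 ≤ i → i ≤ lst.length →
    whatOrderLoop lst i 0 b = if chainGe (b :: lst.drop i) then 0 else 2 := by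
  intro i b h2 hle
  induction hn : lst.length - i generalizing i b with
  | zero =>
    have : i = lst.length := by omega
    subst this
    rw [whatOrderLoop]
    simp [chainGe]
  | succ n ih =>
    have hlt : i < lst.length := by omega
    rw [whatOrderLoop]
    rw [drop_getD lst i hlt]
    simp only [hlt, dif_pos]
    set x := lst.getD i 0 with hx
    by_cases hbx : b ≤ x
    · have hi1 : (i == 1) = false := by simp; omega
      simp only [hi1, hbx, decide_true, Bool.and_true, Bool.true_and, beq_self_eq_true,
        Bool.false_and, Bool.or_false, if_pos, chainGe]
      rw [ih (i+1) x (by omega) (by omega) (by omega)]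
    · have hi1 : (i == 1) = false := by simp; omega
      have h01 : ((0 : Int) == 1) = false := by decide
      simp [hi1, hbx, h01, chainGe]

lemma loop_state1 (lst : List Int) : ∀ i b, 2 ≤ i → i ≤ lst.length →
    whatOrderLoop lst i 1 b = if chainLt (b :: lst.drop i) then 1 else 2 := by
  intro i b h2 hle
  induction hn : lst.length - i generalizing i b with
  | zero =>
    have : i = lst.length := by omega
    subst this
    rw [whatOrderLoop]
    simp [chainLt]
  | succ n ih =>
    have hlt : i < lst.length := by omega
    rw [whatOrderLoop]
    rw [drop_getD lst i hlt]
    simp only [hlt, dif_pos]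
    set x := lst.getD i 0 with hx
    by_cases hxb : x < b
    · have hi1 : (i == 1) = false := by simp; omega
      have h10 : ((1 : Int) == 0) = false := by decide
      simp only [hi1, h10, hxb, decide_true, Bool.and_true, Bool.true_and, beq_self_eq_true,
        Bool.false_and, Bool.or_false, if_pos, chainLt]
      rw [ih (i+1) x (by omega) (by omega) (by omega)]
      simp
    · have hi1 : (i == 1) = false := by simp; omega
      have h10 : ((1 : Int) == 0) = false := by decide
      simp [hi1, hxb, h10, chainLt]

lemma chainGe_cons (x y : Int) (t : List Int) :
    chainGe (x :: y :: t) = (decide (x ≤ y) && chainGe (y :: t)) := rfl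
lemma chainLt_cons (x y : Int) (t : List Int) :
    chainLt (x :: y :: t) = (decide (y < x) && chainLt (y :: t)) := rfl

-- ===== VERDICT (by name: the statement is the Claim_ definition above) =====
theorem what_order_spec : Claim_equal_what_order := by
  intro lst _ hpre
  unfold Spec_what_order
  match lst with
  | [] => exact absurd rfl hpre
  | [x] =>
    show whatOrderLoop [x] 1 (-1) x = what_order_alt [x]
    rw [whatOrderLoop]
    simp [what_order_alt]
  | x :: y :: t =>
    show whatOrderLoop (x :: y :: t) 1 (-1) x = what_order_alt (x :: y :: t)
    have hB : what_order_alt (x :: y :: t)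
        = (if ((x :: y :: t).length == 1) = true then -1
           else if chainGe (x :: y :: t) = true then 0
           else if chainLt (x :: y :: t) = true then 1
           else 2) := by
      show (if ((x :: y :: t).length == 1) = true then (-1 : Int)
            else if _ then 0 else if _ then 1 else 2) = _
      rw [zip_all_ge, zip_all_lt]
    rw [hB]
    have hlen1 : ((x :: y :: t).length == 1) = false := by simp
    rw [hlen1, if_neg (by simp)]
    rw [whatOrderLoop]
    have h1 : 1 < (x :: y :: t).length := by simp
    simp only [h1, dif_pos]
    have hget : (x :: y :: t).getD 1 0 = y := rfl
    have hdrop : (x :: y :: t).drop 2 = t := rfl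
    rw [hget]
    by_cases hxy : x ≤ y
    · have hc : ((-1 : Int) == 0 && decide (x ≤ y) || (1 : Nat) == 1 && decide (x ≤ y)) = true := by
        simp [hxy]
      rw [if_pos hc]
      rw [loop_state0 (x :: y :: t) 2 y (by omega) (by simp)]
      rw [hdrop, chainGe_cons, chainLt_cons]
      simp [hxy, not_lt.mpr hxy]
    · have hyx : y < x := lt_of_not_ge hxy
      have hc : ((-1 : Int) == 0 && decide (x ≤ y) || (1 : Nat) == 1 && decide (x ≤ y)) = false := by
        simp [hxy]
      rw [if_neg (by simp [hxy])]
      have hc2 : ((-1 : Int) == 1 && decide (y < x) || (1 : Nat) == 1 && decide (y < x)) = true := by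
        simp [hyx]
      rw [if_pos hc2]
      rw [loop_state1 (x :: y :: t) 2 y (by omega) (by simp)]
      rw [hdrop, chainGe_cons, chainLt_cons]
      simp [hxy, hyx]
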